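-- pv_equiv track=rewrite | github.com/NathanKrupa/gaudi | src/gaudi/packs/python/rules/errors.py | _share_project_base
-- ===== SOURCE A (Python) =====
-- _BUILTIN_EXC_ROOTS = frozenset({"Exception", "BaseException", "object"})
--
-- def _ancestors(name: str, inheritance: dict[str, set[str]]) -> set[str]:
--     """Return all transitive ancestors of `name` known from this module."""
--     seen: set[str] = set()
--     stack = [name]
--     while stack:
--         cur = stack.pop()
--         for base in inheritance.get(cur, ()):
--             if base in seen or base in _BUILTIN_EXC_ROOTS:
--                 continue
--             seen.add(base)
--             stack.append(base)
--     return seen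
--
-- def _share_project_base(names: set[str], inheritance: dict[str, set[str]]) -> bool:
--     """True if every name in `names` resolves to at least one common project base."""
--     common: set[str] | None = None
--     for name in names:
--         bases = _ancestors(name, inheritance)
--         if not bases:
--             return False
--         common = bases if common is None else common & bases
--         if not common:
--             return False
--     return bool(common)
-- ===== SOURCE B (Python) =====
-- _BUILTIN_EXC_ROOTS = frozenset({"Exception", "BaseException", "object"})
--
--
-- def _ancestors(name, inheritance):
--     """All transitive ancestors of `name`, found by a cursor-driven BFS queue
--     (the queue is only ever appended to; a front cursor replaces pop())."""
--     seen = set()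
--     queue = [name]
--     i = 0
--     while i < len(queue):
--         cur = queue[i]
--         i += 1
--         for base in inheritance.get(cur, ()):
--             if base not in seen and base not in _BUILTIN_EXC_ROOTS:
--                 seen.add(base)
--                 queue.append(base)
--     return seen
--
--
-- def _share_project_base(names, inheritance):
--     if not names:
--         return False
--     common = set.intersection(*(_ancestors(name, inheritance) for name in names))
--     return bool(common)
-- ===== Notes on version B (the rewrite author's own statement) =====
-- stated objective: alternative
-- what changed: B's _ancestors explores with a cursor-driven FIFO queue (BFS, queue only appended to) instead of A's LIFO pop/append stack, and B's _share_project_base replaces the incremental optional-intersection loop with early exits by an empty-input guard plus one set.intersection(*...) over all ancestor sets.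
import Mathlib
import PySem

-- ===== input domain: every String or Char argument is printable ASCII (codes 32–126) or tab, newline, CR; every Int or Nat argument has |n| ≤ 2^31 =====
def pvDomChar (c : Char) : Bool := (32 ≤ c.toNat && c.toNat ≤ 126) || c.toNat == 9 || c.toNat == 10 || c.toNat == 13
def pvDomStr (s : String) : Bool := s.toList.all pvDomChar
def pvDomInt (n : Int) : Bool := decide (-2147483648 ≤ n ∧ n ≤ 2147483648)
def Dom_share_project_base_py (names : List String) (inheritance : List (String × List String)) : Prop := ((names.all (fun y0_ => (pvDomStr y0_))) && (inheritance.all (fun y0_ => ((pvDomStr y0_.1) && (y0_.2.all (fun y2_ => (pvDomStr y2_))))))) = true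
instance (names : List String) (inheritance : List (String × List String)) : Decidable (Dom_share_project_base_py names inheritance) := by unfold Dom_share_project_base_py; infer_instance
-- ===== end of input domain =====

-- B replaces A's LIFO pop/append worklist in `_ancestors` by a cursor-driven FIFO queue (BFS)
-- and replaces `_share_project_base`'s incremental intersection loop with early exits by one
-- set.intersection(*…) over all ancestor sets: an alternative decomposition, same complexity.

-- ===== PORT A =====
-- module constant _BUILTIN_EXC_ROOTS (both Pythons carry the same frozenset literal)
def pvRoots : List String := ["Exception", "BaseException", "object"]

-- inheritance.get(cur, ()) (shared helper expression of both Pythons)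
def pvBases (inheritance : List (String × List String)) (cur : String) : List String :=
  (PySem.Dict.get? (PySem.Dict.mk inheritance) cur).getD []

-- fuel bound for the worklist loops: 1 + 2·(number of distinct strings occurring in the dict's
-- values); provably sufficient (ancLoopA_spec / ancLoopB_spec below), so the loops never hit it
def pvValsList (inheritance : List (String × List String)) : List String :=
  PySem.Set.ofList ((inheritance.map Prod.snd).flatten)
def pvValsBound (inheritance : List (String × List String)) : Nat :=
  1 + 2 * (pvValsList inheritance).length

-- A's `while stack:` loop; the stack top is the list HEAD (Python pops/appends at the end)
def ancLoopA (inheritance : List (String × List String)) :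
    Nat → List String → List String → Option (List String)
  | 0, seen, stack => if stack.isEmpty then some seen else none
  | _ + 1, seen, [] => some seen
  | fuel + 1, seen, cur :: rest =>
      ancLoopA inheritance fuel
        ((pvBases inheritance cur).foldl
          (fun (p : List String × List String) base =>
            if PySem.Set.contains p.1 base || pvRoots.contains base then p
            else (PySem.Set.add p.1 base, base :: p.2)) (seen, rest)).1
        ((pvBases inheritance cur).foldl
          (fun (p : List String × List String) base =>
            if PySem.Set.contains p.1 base || pvRoots.contains base then p
            else (PySem.Set.add p.1 base, base :: p.2)) (seen, rest)).2

-- A's _ancestors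
def ancestorsA (name : String) (inheritance : List (String × List String)) : List String :=
  (ancLoopA inheritance (pvValsBound inheritance) [] [name]).getD []

-- A's `for name in names:` loop with its running optional intersection and early returns
def outerA (inheritance : List (String × List String)) :
    List String → Option (List String) → Bool
  | [], common => match common with | none => false | some c => !c.isEmpty
  | name :: rest, common =>
      let bases := ancestorsA name inheritance
      if bases.isEmpty then false
      else
        let common' := match common with | none => bases | some c => PySem.Set.inter c bases
        if common'.isEmpty then false
        else outerA inheritance rest (some common')

def share_project_base_py (names : List String) (inheritance : List (String × List String)) : Bool :=
  outerA inheritance names none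

-- ===== PORT B =====
-- B's `while i < len(queue):` cursor loop; the queue only ever grows at the end
def ancLoopB (inheritance : List (String × List String)) :
    Nat → List String → List String → Nat → Option (List String)
  | 0, seen, queue, i => if queue.length ≤ i then some seen else none
  | fuel + 1, seen, queue, i =>
      if h : i < queue.length then
        ancLoopB inheritance fuel
          ((pvBases inheritance queue[i]).foldl
            (fun (q : List String × List String) base =>
              if !PySem.Set.contains q.1 base && !pvRoots.contains base then
                (PySem.Set.add q.1 base, q.2 ++ [base])
              else q) (seen, queue)).1
          ((pvBases inheritance queue[i]).foldl
            (fun (q : List String × List String) base =>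
              if !PySem.Set.contains q.1 base && !pvRoots.contains base then
                (PySem.Set.add q.1 base, q.2 ++ [base])
              else q) (seen, queue)).2 (i + 1)
      else some seen

-- B's _ancestors
def ancestorsB (name : String) (inheritance : List (String × List String)) : List String :=
  (ancLoopB inheritance (pvValsBound inheritance) [] [name] 0).getD []

-- B's body: empty guard, then one big intersection
def share_project_base_py_alt (names : List String) (inheritance : List (String × List String)) : Bool :=
  match names with
  | [] => false
  | name :: rest =>
      let common := rest.foldl
        (fun c n => PySem.Set.inter c (ancestorsB n inheritance)) (ancestorsB name inheritance)
      !common.isEmpty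

-- ===== PRECONDITION & SPEC =====
def Spec_share_project_base_py (names : List String) (inheritance : List (String × List String)) (out : Bool) : Prop := out = share_project_base_py_alt names inheritance
instance (names : List String) (inheritance : List (String × List String)) (out : Bool) : Decidable (Spec_share_project_base_py names inheritance out) := by unfold Spec_share_project_base_py; infer_instance

-- ===== CLAIM (what is proved, stated in full; the proofs are below) =====
def Claim_equal_share_project_base_py : Prop := ∀ (names : List String) (inheritance : List (String × List String)), Dom_share_project_base_py names inheritance → Spec_share_project_base_py names inheritance (share_project_base_py names inheritance)

-- ===== LEMMAS AND PROOFS =====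

-- the project-ancestor relation both _ancestors compute: reachable from `name` through the
-- dict in ≥ 1 steps, never passing through a builtin root
inductive Anc (inheritance : List (String × List String)) (name : String) : String → Prop
  | base : ∀ {b}, b ∈ pvBases inheritance name → pvRoots.contains b = false →
      Anc inheritance name b
  | trans : ∀ {u b}, Anc inheritance name u → b ∈ pvBases inheritance u →
      pvRoots.contains b = false → Anc inheritance name b

theorem pvBases_subset_vals {inheritance : List (String × List String)} {u x : String}
    (hx : x ∈ pvBases inheritance u) : x ∈ pvValsList inheritance := by
  unfold pvBases at hx
  cases hfind : PySem.Dict.get? (PySem.Dict.mk inheritance) u with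
  | none => rw [hfind] at hx; simp at hx
  | some v =>
    rw [hfind] at hx
    simp only [Option.getD_some] at hx
    unfold PySem.Dict.get? at hfind
    obtain ⟨p, hp, hpv⟩ : ∃ p ∈ inheritance, p.2 = v := by
      rcases Option.map_eq_some_iff.mp hfind with ⟨p, hfp, hv⟩
      exact ⟨p, List.mem_of_find?_eq_some hfp, hv⟩
    unfold pvValsList
    rw [PySem.Set.mem_ofList]
    exact List.mem_flatten.mpr ⟨p.2, List.mem_map.mpr ⟨p, hp, rfl⟩, hpv ▸ hx⟩

theorem foldA_spec :
    ∀ (bases seen pend : List String),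
    ∃ newl : List String,
      (bases.foldl (fun (p : List String × List String) base =>
          if PySem.Set.contains p.1 base || pvRoots.contains base then p
          else (PySem.Set.add p.1 base, base :: p.2)) (seen, pend)).1 = seen ++ newl ∧
      (bases.foldl (fun (p : List String × List String) base =>
          if PySem.Set.contains p.1 base || pvRoots.contains base then p
          else (PySem.Set.add p.1 base, base :: p.2)) (seen, pend)).2 = newl.reverse ++ pend ∧
      (∀ x ∈ newl, x ∈ bases ∧ pvRoots.contains x = false ∧ x ∉ seen) ∧
      (∀ b ∈ bases, pvRoots.contains b = false → b ∈ seen ++ newl) ∧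
      (seen.Nodup → (seen ++ newl).Nodup) := by
  intro bases
  induction bases with
  | nil => intro seen pend; exact ⟨[], by simp⟩
  | cons b bs ih =>
    intro seen pend
    simp only [List.foldl_cons]
    by_cases hc : PySem.Set.contains seen b || pvRoots.contains b
    · rw [if_pos hc]
      obtain ⟨newl, h1, h2, h3, h4, h5⟩ := ih seen pend
      refine ⟨newl, h1, h2, ?_, ?_, h5⟩
      · exact fun x hx => ⟨List.mem_cons_of_mem _ ((h3 x hx).1), (h3 x hx).2⟩
      · intro b' hb' hroot
        rcases List.mem_cons.mp hb' with rfl | hmem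
        · rcases Bool.or_eq_true_iff.mp hc with h | h
          · exact List.mem_append_left _ ((PySem.Set.contains_iff seen b').mp h)
          · rw [hroot] at h; exact absurd h (by simp)
        · exact h4 b' hmem hroot
    · rw [if_neg hc]
      have hc' : PySem.Set.contains seen b = false ∧ pvRoots.contains b = false := by
        constructor <;> simp_all [Bool.or_eq_true, not_or]
      have hnotmem : b ∉ seen := fun h => by
        rw [(PySem.Set.contains_iff seen b).mpr h] at hc'; exact absurd hc'.1 (by simp)
      have hroot : pvRoots.contains b = false := hc'.2
      rw [PySem.Set.add_of_not_mem hnotmem]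
      obtain ⟨newl, h1, h2, h3, h4, h5⟩ := ih (seen ++ [b]) (b :: pend)
      refine ⟨b :: newl, ?_, ?_, ?_, ?_, ?_⟩
      · rw [h1, List.append_assoc]; rfl
      · rw [h2, List.reverse_cons, List.append_assoc]; rfl
      · intro x hx
        rcases List.mem_cons.mp hx with rfl | hx'
        · exact ⟨List.mem_cons_self, hroot, hnotmem⟩
        · obtain ⟨ha, hb', hcm⟩ := h3 x hx'
          exact ⟨List.mem_cons_of_mem _ ha, hb', fun h => hcm (List.mem_append_left _ h)⟩
      · intro b' hb' hr
        rcases List.mem_cons.mp hb' with rfl | hmem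
        · simp
        · have := h4 b' hmem hr
          simpa [List.append_assoc] using this
      · intro hnd
        have : (seen ++ [b]).Nodup := by
          rw [List.nodup_append]
          refine ⟨hnd, List.nodup_singleton b, ?_⟩
          intro a ha c hc
          rw [List.mem_singleton] at hc
          subst hc
          exact fun h => hnotmem (h ▸ ha)
        simpa [List.append_assoc] using h5 this

theorem foldB_spec :
    ∀ (bases seen pend : List String),
    ∃ newl : List String,
      (bases.foldl (fun (q : List String × List String) base =>
          if !PySem.Set.contains q.1 base && !pvRoots.contains base then
            (PySem.Set.add q.1 base, q.2 ++ [base])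
          else q) (seen, pend)).1 = seen ++ newl ∧
      (bases.foldl (fun (q : List String × List String) base =>
          if !PySem.Set.contains q.1 base && !pvRoots.contains base then
            (PySem.Set.add q.1 base, q.2 ++ [base])
          else q) (seen, pend)).2 = pend ++ newl ∧
      (∀ x ∈ newl, x ∈ bases ∧ pvRoots.contains x = false ∧ x ∉ seen) ∧
      (∀ b ∈ bases, pvRoots.contains b = false → b ∈ seen ++ newl) ∧
      (seen.Nodup → (seen ++ newl).Nodup) := by
  intro bases
  induction bases with
  | nil => intro seen pend; exact ⟨[], by simp⟩
  | cons b bs ih =>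
    intro seen pend
    simp only [List.foldl_cons]
    by_cases hc : !PySem.Set.contains seen b && !pvRoots.contains b
    · rw [if_pos hc]
      have hc' : PySem.Set.contains seen b = false ∧ pvRoots.contains b = false := by
        constructor <;> simp_all
      have hnotmem : b ∉ seen := fun h => by
        rw [(PySem.Set.contains_iff seen b).mpr h] at hc'; exact absurd hc'.1 (by simp)
      have hroot : pvRoots.contains b = false := hc'.2
      rw [PySem.Set.add_of_not_mem hnotmem]
      obtain ⟨newl, h1, h2, h3, h4, h5⟩ := ih (seen ++ [b]) (pend ++ [b])
      refine ⟨b :: newl, ?_, ?_, ?_, ?_, ?_⟩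
      · rw [h1, List.append_assoc]; rfl
      · rw [h2, List.append_assoc]; rfl
      · intro x hx
        rcases List.mem_cons.mp hx with rfl | hx'
        · exact ⟨List.mem_cons_self, hroot, hnotmem⟩
        · obtain ⟨ha, hb', hcm⟩ := h3 x hx'
          exact ⟨List.mem_cons_of_mem _ ha, hb', fun h => hcm (List.mem_append_left _ h)⟩
      · intro b' hb' hr
        rcases List.mem_cons.mp hb' with rfl | hmem
        · simp
        · have := h4 b' hmem hr
          simpa [List.append_assoc] using this
      · intro hnd
        have : (seen ++ [b]).Nodup := by
          rw [List.nodup_append]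
          refine ⟨hnd, List.nodup_singleton b, ?_⟩
          intro a ha c hc
          rw [List.mem_singleton] at hc
          subst hc
          exact fun h => hnotmem (h ▸ ha)
        simpa [List.append_assoc] using h5 this
    · rw [if_neg hc]
      obtain ⟨newl, h1, h2, h3, h4, h5⟩ := ih seen pend
      refine ⟨newl, h1, h2, ?_, ?_, h5⟩
      · exact fun x hx => ⟨List.mem_cons_of_mem _ ((h3 x hx).1), (h3 x hx).2⟩
      · intro b' hb' hroot
        rcases List.mem_cons.mp hb' with rfl | hmem
        · have : PySem.Set.contains seen b' = true := by
            by_contra h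
            exact hc (by simp_all)
          exact List.mem_append_left _ ((PySem.Set.contains_iff seen b').mp this)
        · exact h4 b' hmem hroot

theorem ancLoopA_spec (inheritance : List (String × List String)) (name : String) :
    ∀ (fuel : Nat) (seen stack : List String),
    seen.Nodup →
    (∀ x ∈ seen, x ∈ pvValsList inheritance) →
    (∀ x ∈ seen, Anc inheritance name x) →
    (∀ x ∈ stack, x = name ∨ x ∈ seen) →
    (∀ u, (u = name ∨ u ∈ seen) → u ∈ stack ∨
        (∀ b ∈ pvBases inheritance u, pvRoots.contains b = false → b ∈ seen)) →
    stack.length + 2 * ((pvValsList inheritance).length - seen.length) ≤ fuel →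
    ∃ out, ancLoopA inheritance fuel seen stack = some out ∧
      (∀ x ∈ out, Anc inheritance name x) ∧
      (∀ u, (u = name ∨ u ∈ out) →
        (∀ b ∈ pvBases inheritance u, pvRoots.contains b = false → b ∈ out)) := by
  intro fuel
  induction fuel with
  | zero =>
    intro seen stack hnd hvals hanc hstk hcl hm
    have hstack : stack = [] := List.eq_nil_of_length_eq_zero (by omega)
    subst hstack
    refine ⟨seen, by simp [ancLoopA], hanc, ?_⟩
    intro u hu b hb hr
    rcases hcl u hu with h | h
    · simp at h
    · exact h b hb hr
  | succ f ih =>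
    intro seen stack hnd hvals hanc hstk hcl hm
    cases stack with
    | nil =>
      refine ⟨seen, by simp [ancLoopA], hanc, ?_⟩
      intro u hu b hb hr
      rcases hcl u hu with h | h
      · simp at h
      · exact h b hb hr
    | cons cur rest =>
      obtain ⟨newl, h1, h2, h3, h4, h5⟩ := foldA_spec (pvBases inheritance cur) seen rest
      have step : ancLoopA inheritance (f + 1) seen (cur :: rest) =
          ancLoopA inheritance f (seen ++ newl) (newl.reverse ++ rest) := by
        rw [ancLoopA, h1, h2]
      have hcur : cur = name ∨ cur ∈ seen := hstk cur List.mem_cons_self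
      have hnewAnc : ∀ x ∈ newl, Anc inheritance name x := by
        intro x hx
        obtain ⟨hb, hr, _⟩ := h3 x hx
        rcases hcur with rfl | hcs
        · exact Anc.base hb hr
        · exact Anc.trans (hanc cur hcs) hb hr
      have hsub : ∀ x ∈ seen ++ newl, x ∈ pvValsList inheritance := by
        intro x hx
        rcases List.mem_append.mp hx with h | h
        · exact hvals x h
        · exact pvBases_subset_vals ((h3 x h).1)
      have hlen : (seen ++ newl).length ≤ (pvValsList inheritance).length :=
        (List.subperm_of_subset (h5 hnd) (fun x hx => hsub x hx)).length_le
      have hm' : (newl.reverse ++ rest).length +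
          2 * ((pvValsList inheritance).length - (seen ++ newl).length) ≤ f := by
        simp only [List.length_append, List.length_reverse, List.length_cons] at *
        omega
      obtain ⟨out, ho, ha, hc⟩ := ih (seen ++ newl) (newl.reverse ++ rest) (h5 hnd) hsub
        (by
          intro x hx
          rcases List.mem_append.mp hx with h | h
          · exact hanc x h
          · exact hnewAnc x h)
        (by
          intro x hx
          rcases List.mem_append.mp hx with h | h
          · exact Or.inr (List.mem_append_right _ (List.mem_reverse.mp h))
          · rcases hstk x (List.mem_cons_of_mem _ h) with h' | h'
            · exact Or.inl h'
            · exact Or.inr (List.mem_append_left _ h'))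
        (by
          intro u hu
          by_cases hun : u ∈ newl
          · exact Or.inl (List.mem_append_left _ (List.mem_reverse.mpr hun))
          · have hu' : u = name ∨ u ∈ seen := by
              rcases hu with h | h
              · exact Or.inl h
              · rcases List.mem_append.mp h with h' | h'
                · exact Or.inr h'
                · exact absurd h' hun
            rcases hcl u hu' with h | h
            · rcases List.mem_cons.mp h with rfl | h'
              · exact Or.inr (fun b hb hr => h4 b hb hr)
              · exact Or.inl (List.mem_append_right _ h')
            · exact Or.inr (fun b hb hr => List.mem_append_left _ (h b hb hr)))
        hm'
      exact ⟨out, step ▸ ho, ha, hc⟩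

theorem ancLoopB_spec (inheritance : List (String × List String)) (name : String) :
    ∀ (fuel : Nat) (seen queue : List String) (i : Nat),
    seen.Nodup →
    (∀ x ∈ seen, x ∈ pvValsList inheritance) →
    (∀ x ∈ seen, Anc inheritance name x) →
    (∀ x ∈ queue, x = name ∨ x ∈ seen) →
    (∀ u, (u = name ∨ u ∈ seen) → u ∈ queue.drop i ∨
        (∀ b ∈ pvBases inheritance u, pvRoots.contains b = false → b ∈ seen)) →
    (queue.length - i) + 2 * ((pvValsList inheritance).length - seen.length) ≤ fuel →
    ∃ out, ancLoopB inheritance fuel seen queue i = some out ∧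
      (∀ x ∈ out, Anc inheritance name x) ∧
      (∀ u, (u = name ∨ u ∈ out) →
        (∀ b ∈ pvBases inheritance u, pvRoots.contains b = false → b ∈ out)) := by
  intro fuel
  induction fuel with
  | zero =>
    intro seen queue i hnd hvals hanc hq hcl hm
    have hile : queue.length ≤ i := by omega
    refine ⟨seen, by simp [ancLoopB, hile], hanc, ?_⟩
    intro u hu b hb hr
    rcases hcl u hu with h | h
    · rw [List.drop_eq_nil_of_le hile] at h; simp at h
    · exact h b hb hr
  | succ f ih =>
    intro seen queue i hnd hvals hanc hq hcl hm
    by_cases hlt : i < queue.length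
    · obtain ⟨newl, h1, h2, h3, h4, h5⟩ := foldB_spec (pvBases inheritance queue[i]) seen queue
      have step : ancLoopB inheritance (f + 1) seen queue i =
          ancLoopB inheritance f (seen ++ newl) (queue ++ newl) (i + 1) := by
        rw [ancLoopB, dif_pos hlt, h1, h2]
      have hcur : queue[i] = name ∨ queue[i] ∈ seen := hq _ (List.getElem_mem hlt)
      have hnewAnc : ∀ x ∈ newl, Anc inheritance name x := by
        intro x hx
        obtain ⟨hb, hr, _⟩ := h3 x hx
        rcases hcur with hcn | hcs
        · exact Anc.base (hcn ▸ hb) hr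
        · exact Anc.trans (hanc _ hcs) hb hr
      have hsub : ∀ x ∈ seen ++ newl, x ∈ pvValsList inheritance := by
        intro x hx
        rcases List.mem_append.mp hx with h | h
        · exact hvals x h
        · exact pvBases_subset_vals ((h3 x h).1)
      have hlen : (seen ++ newl).length ≤ (pvValsList inheritance).length :=
        (List.subperm_of_subset (h5 hnd) (fun x hx => hsub x hx)).length_le
      have hdrop : (queue ++ newl).drop (i + 1) = queue.drop (i + 1) ++ newl :=
        List.drop_append_of_le_length (by omega)
      have hm' : ((queue ++ newl).length - (i + 1)) +
          2 * ((pvValsList inheritance).length - (seen ++ newl).length) ≤ f := by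
        simp only [List.length_append] at *
        omega
      obtain ⟨out, ho, ha, hc⟩ := ih (seen ++ newl) (queue ++ newl) (i + 1) (h5 hnd) hsub
        (by
          intro x hx
          rcases List.mem_append.mp hx with h | h
          · exact hanc x h
          · exact hnewAnc x h)
        (by
          intro x hx
          rcases List.mem_append.mp hx with h | h
          · rcases hq x h with h' | h'
            · exact Or.inl h'
            · exact Or.inr (List.mem_append_left _ h')
          · exact Or.inr (List.mem_append_right _ h))
        (by
          intro u hu
          by_cases hun : u ∈ newl
          · exact Or.inl (hdrop ▸ List.mem_append_right _ hun)
          · have hu' : u = name ∨ u ∈ seen := by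
              rcases hu with h | h
              · exact Or.inl h
              · rcases List.mem_append.mp h with h' | h'
                · exact Or.inr h'
                · exact absurd h' hun
            rcases hcl u hu' with h | h
            · rw [List.drop_eq_getElem_cons hlt] at h
              rcases List.mem_cons.mp h with rfl | h'
              · exact Or.inr (fun b hb hr => h4 b hb hr)
              · exact Or.inl (hdrop ▸ List.mem_append_left _ h')
            · exact Or.inr (fun b hb hr => List.mem_append_left _ (h b hb hr)))
        hm'
      exact ⟨out, step ▸ ho, ha, hc⟩
    · have hile : queue.length ≤ i := by omega
      refine ⟨seen, by simp [ancLoopB, hlt], hanc, ?_⟩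
      intro u hu b hb hr
      rcases hcl u hu with h | h
      · rw [List.drop_eq_nil_of_le hile] at h; simp at h
      · exact h b hb hr

theorem mem_ancestorsA {name : String} {inheritance : List (String × List String)} {x : String} :
    x ∈ ancestorsA name inheritance ↔ Anc inheritance name x := by
  obtain ⟨out, ho, ha, hc⟩ := ancLoopA_spec inheritance name (pvValsBound inheritance) [] [name]
    List.nodup_nil (by simp) (by simp)
    (fun y hy => Or.inl (List.mem_singleton.mp hy))
    (fun u hu => Or.inl (List.mem_singleton.mpr (by simpa using hu)))
    (by simp [pvValsBound])
  unfold ancestorsA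
  rw [ho, Option.getD_some]
  constructor
  · exact ha x
  · intro h
    induction h with
    | base hb hr => exact hc name (Or.inl rfl) _ hb hr
    | trans hu hb hr ih => exact hc _ (Or.inr ih) _ hb hr

theorem mem_ancestorsB {name : String} {inheritance : List (String × List String)} {x : String} :
    x ∈ ancestorsB name inheritance ↔ Anc inheritance name x := by
  obtain ⟨out, ho, ha, hc⟩ := ancLoopB_spec inheritance name (pvValsBound inheritance) [] [name] 0
    List.nodup_nil (by simp) (by simp)
    (fun y hy => Or.inl (List.mem_singleton.mp hy))
    (fun u hu => Or.inl (by simpa using hu))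
    (by simp [pvValsBound])
  unfold ancestorsB
  rw [ho, Option.getD_some]
  constructor
  · exact ha x
  · intro h
    induction h with
    | base hb hr => exact hc name (Or.inl rfl) _ hb hr
    | trans hu hb hr ih => exact hc _ (Or.inr ih) _ hb hr

theorem mem_foldInter (f : String → List String) :
    ∀ (l : List String) (c : List String) (x : String),
    x ∈ l.foldl (fun c n => PySem.Set.inter c (f n)) c ↔ x ∈ c ∧ ∀ n ∈ l, x ∈ f n := by
  intro l
  induction l with
  | nil => simp
  | cons n rest ih =>
    intro c x
    simp only [List.foldl_cons, ih, PySem.Set.mem_inter, List.mem_cons]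
    constructor
    · rintro ⟨⟨hc, hn⟩, hrest⟩
      exact ⟨hc, fun m hm => hm.elim (fun h => h ▸ hn) (hrest m)⟩
    · rintro ⟨hc, hall⟩
      exact ⟨⟨hc, hall n (Or.inl rfl)⟩, fun m hm => hall m (Or.inr hm)⟩

theorem isEmpty_eq_of_mem_iff {l l' : List String} (h : ∀ x, x ∈ l ↔ x ∈ l') :
    l.isEmpty = l'.isEmpty := by
  cases l with
  | nil =>
    cases l' with
    | nil => rfl
    | cons y t => exact absurd ((h y).mpr (List.mem_cons_self)) (by simp)
  | cons y t =>
    cases l' with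
    | nil => exact absurd ((h y).mp (List.mem_cons_self)) (by simp)
    | cons z t' => rfl

theorem outerA_eq (inheritance : List (String × List String)) :
    ∀ (rest : List String) (c : List String),
    outerA inheritance rest (some c) =
      !(rest.foldl (fun c n => PySem.Set.inter c (ancestorsA n inheritance)) c).isEmpty := by
  intro rest
  induction rest with
  | nil => intro c; rfl
  | cons n rest ih =>
    intro c
    rw [outerA]
    simp only [List.foldl_cons]
    by_cases hb : (ancestorsA n inheritance).isEmpty
    · rw [if_pos hb]
      have hnil : ancestorsA n inheritance = [] := List.isEmpty_iff.mp hb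
      have : rest.foldl (fun c n => PySem.Set.inter c (ancestorsA n inheritance))
          (PySem.Set.inter c (ancestorsA n inheritance)) = [] := by
        rw [List.eq_nil_iff_forall_not_mem]
        intro x hx
        have := ((mem_foldInter _ rest _ x).mp hx).1
        rw [PySem.Set.mem_inter, hnil] at this
        simp at this
      rw [this]
      rfl
    · rw [if_neg hb]
      by_cases hcm : (PySem.Set.inter c (ancestorsA n inheritance)).isEmpty
      · rw [if_pos hcm]
        have hnil : PySem.Set.inter c (ancestorsA n inheritance) = [] := List.isEmpty_iff.mp hcm
        have : rest.foldl (fun c n => PySem.Set.inter c (ancestorsA n inheritance))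
            (PySem.Set.inter c (ancestorsA n inheritance)) = [] := by
          rw [List.eq_nil_iff_forall_not_mem]
          intro x hx
          have := ((mem_foldInter _ rest _ x).mp hx).1
          rw [hnil] at this
          simp at this
        rw [this]
        rfl
      · rw [if_neg hcm]
        exact ih _

-- ===== VERDICT (by name: the statement is the Claim_ definition above) =====
theorem mem_ancestorsAB {name : String} {inheritance : List (String × List String)} {x : String} :
    x ∈ ancestorsA name inheritance ↔ x ∈ ancestorsB name inheritance := by
  rw [mem_ancestorsA, mem_ancestorsB]

theorem share_project_base_py_spec : Claim_equal_share_project_base_py := by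
  unfold Claim_equal_share_project_base_py
  intro names inheritance _
  unfold Spec_share_project_base_py share_project_base_py
  cases names with
  | nil => rfl
  | cons n rest =>
    have halt : share_project_base_py_alt (n :: rest) inheritance =
        !(rest.foldl (fun c n => PySem.Set.inter c (ancestorsB n inheritance))
          (ancestorsB n inheritance)).isEmpty := rfl
    rw [halt, outerA]
    by_cases hb : (ancestorsA n inheritance).isEmpty
    · rw [if_pos hb]
      have hnilA : ancestorsA n inheritance = [] := List.isEmpty_iff.mp hb
      have hnilB : ancestorsB n inheritance = [] := by
        rw [List.eq_nil_iff_forall_not_mem]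
        intro x hx
        have := mem_ancestorsAB.mpr hx
        rw [hnilA] at this
        simp at this
      have : rest.foldl (fun c n => PySem.Set.inter c (ancestorsB n inheritance))
          (ancestorsB n inheritance) = [] := by
        rw [List.eq_nil_iff_forall_not_mem]
        intro x hx
        have := ((mem_foldInter _ rest _ x).mp hx).1
        rw [hnilB] at this
        simp at this
      rw [this]
      rfl
    · rw [if_neg hb, if_neg hb, outerA_eq]
      congr 1
      apply isEmpty_eq_of_mem_iff
      intro x
      rw [mem_foldInter, mem_foldInter, mem_ancestorsAB]
      constructor
      · rintro ⟨h1, h2⟩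
        exact ⟨h1, fun m hm => mem_ancestorsAB.mp (h2 m hm)⟩
      · rintro ⟨h1, h2⟩
        exact ⟨h1, fun m hm => mem_ancestorsAB.mpr (h2 m hm)⟩
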